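-- pv_equiv track=rewrite | github.com/legosteenjaap/ComplexSystems_groupProject | internal/random_spanning_tree_matrix.py | get_amount_of_nodes
-- ===== SOURCE A (Python) =====
-- def get_amount_of_nodes(depth):
--     amount_of_nodes = 0
--     previous_layer_nodes = 3
--
--     for i in range(2, depth + 1):
--         current_layer_nodes = 2 * previous_layer_nodes
--         amount_of_nodes += current_layer_nodes
--         previous_layer_nodes= current_layer_nodes
--
--     amount_of_nodes += 4
--
--     return amount_of_nodes
-- ===== SOURCE B (Python) =====
-- def get_amount_of_nodes(depth):
--     # Closed form: layers 2..depth hold 3*2**(i-1) nodes; geometric sum gives 3*2**depth - 2.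
--     if depth < 2:
--         return 4
--     return 3 * 2 ** depth - 2
-- ===== Notes on version B (the rewrite author's own statement) =====
-- stated objective: faster
-- what changed: Replaces the O(depth) doubling loop with the closed-form geometric sum 3*2**depth - 2 (4 for depth < 2).
import Mathlib
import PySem

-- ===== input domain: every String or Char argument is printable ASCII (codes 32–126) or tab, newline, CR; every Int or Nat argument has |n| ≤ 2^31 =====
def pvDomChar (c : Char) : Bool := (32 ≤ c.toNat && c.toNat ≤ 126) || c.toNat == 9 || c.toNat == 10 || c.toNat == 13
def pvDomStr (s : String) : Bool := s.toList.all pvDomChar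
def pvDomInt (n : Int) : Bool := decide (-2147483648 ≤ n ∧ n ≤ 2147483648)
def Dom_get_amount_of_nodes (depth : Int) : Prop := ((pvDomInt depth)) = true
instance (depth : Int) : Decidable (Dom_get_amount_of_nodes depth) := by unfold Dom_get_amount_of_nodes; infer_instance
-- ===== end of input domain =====

-- B replaces A's O(depth) doubling loop with the closed-form geometric sum 3*2^depth - 2 (4 for depth < 2).

-- ===== PORT A =====
def get_amount_of_nodes (depth : Int) : Int :=
  let s := (PySem.List.pyRange 2 (depth + 1) 1).foldl
    (fun (st : Int × Int) _ =>
      let current_layer_nodes := 2 * st.2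
      (st.1 + current_layer_nodes, current_layer_nodes))
    (0, 3)
  s.1 + 4

-- ===== PORT B =====
def get_amount_of_nodes_alt (depth : Int) : Int :=
  if depth < 2 then 4 else 3 * 2 ^ depth.toNat - 2

-- ===== PRECONDITION & SPEC =====
def Spec_get_amount_of_nodes (depth : Int) (out : Int) : Prop := out = get_amount_of_nodes_alt depth
instance (depth : Int) (out : Int) : Decidable (Spec_get_amount_of_nodes depth out) := by unfold Spec_get_amount_of_nodes; infer_instance

-- ===== CLAIM (what is proved, stated in full; the proofs are below) =====
def Claim_equal_get_amount_of_nodes : Prop := ∀ (depth : Int), Dom_get_amount_of_nodes depth → Spec_get_amount_of_nodes depth (get_amount_of_nodes depth)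

-- ===== LEMMAS AND PROOFS =====

-- The fold ignores the list elements: after k steps from (a, p) the state is (a + p*(2^(k+1) - 2), p*2^k).
theorem pv_fold_state (L : List Int) (a p : Int) :
    L.foldl (fun (st : Int × Int) _ =>
      let c := 2 * st.2; (st.1 + c, c)) (a, p)
    = (a + p * (2 ^ (L.length + 1) - 2), p * 2 ^ L.length) := by
  induction L generalizing a p with
  | nil => simp
  | cons x t ih =>
      simp only [List.foldl_cons, List.length_cons, ih]
      refine Prod.ext ?_ ?_ <;> simp [pow_succ] <;> ring

theorem get_amount_of_nodes_spec : Claim_equal_get_amount_of_nodes := by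
  intro depth _
  unfold Spec_get_amount_of_nodes get_amount_of_nodes get_amount_of_nodes_alt
  by_cases h : depth < 2
  · rw [PySem.List.pyRange_one_eq_nil (by omega)]
    simp [h]
  · rw [Int.not_lt] at h
    simp only [pv_fold_state, PySem.List.length_pyRange_one]
    rw [if_neg (by omega)]
    have hlen : (depth + 1 - 2).toNat + 1 = depth.toNat := by omega
    rw [hlen]
    ring

-- ===== VERDICT (by name: the statement is the Claim_ definition above) =====
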